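-- pv_equiv track=rewrite | github.com/spektrum-labs/Transformations | safeguards/surefire-cyber-resilience/google/isAttachmentScanningEnabled.py | scan_dict_for_attachment
-- ===== SOURCE A (Python) =====
-- def scan_dict_for_attachment(value_dict):
--     """Return True if value_dict contains an explicit attachment scanning flag set to True."""
--     explicit_fields = [
--         "attachmentScanningEnabled",
--         "maliciousAttachmentEnabled",
--         "anomalousAttachmentProtectionEnabled",
--         "enableSandbox",
--         "attachmentProtectionEnabled",
--         "sandboxEnabled",
--         "malwareScanningEnabled",
--         "attachmentScanEnabled",
--     ]
--     for field in explicit_fields: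
--         if value_dict.get(field) is True:
--             return True
--     for key in value_dict:
--         lower_key = key.lower()
--         if "attachment" in lower_key and value_dict[key] is True:
--             return True
--         if "sandbox" in lower_key and value_dict[key] is True:
--             return True
--         if "malware" in lower_key and value_dict[key] is True:
--             return True
--     return False
-- ===== SOURCE B (Python) =====
-- def scan_dict_for_attachment(value_dict):
--     """Return True if value_dict contains an explicit attachment scanning flag set to True."""
--     keywords = ("attachment", "sandbox", "malware")
--     for key, value in value_dict.items():
--         if value is True and any(w in key.lower() for w in keywords):
--             return True
--     return False
-- ===== Notes on version B (the rewrite author's own statement) =====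
-- stated objective: simpler
-- what changed: A's explicit-field pass is dropped (every listed field name lowercased contains 'attachment', 'sandbox' or 'malware', so it is subsumed by the substring scan); B is one single pass over the items testing value and lowercased-key substring together.
import Mathlib
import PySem

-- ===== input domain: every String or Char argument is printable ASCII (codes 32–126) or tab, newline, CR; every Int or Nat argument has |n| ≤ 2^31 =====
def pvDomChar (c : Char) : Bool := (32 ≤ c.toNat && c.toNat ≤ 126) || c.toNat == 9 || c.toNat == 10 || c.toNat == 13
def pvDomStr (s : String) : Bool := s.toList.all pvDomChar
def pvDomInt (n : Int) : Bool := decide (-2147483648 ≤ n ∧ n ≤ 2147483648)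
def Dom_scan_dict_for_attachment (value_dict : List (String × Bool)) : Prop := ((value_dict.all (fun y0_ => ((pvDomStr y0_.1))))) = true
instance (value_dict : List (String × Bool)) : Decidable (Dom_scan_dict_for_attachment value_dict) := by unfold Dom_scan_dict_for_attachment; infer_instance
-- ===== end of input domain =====

-- B drops A's explicit-field pass (each listed field name lowercased contains 'attachment', 'sandbox' or 'malware',
-- so that pass is subsumed by the substring scan) and does one single pass over the items: simpler.

-- ===== PORT A =====
def pvExplicitFields : List String :=
  ["attachmentScanningEnabled", "maliciousAttachmentEnabled", "anomalousAttachmentProtectionEnabled",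
   "enableSandbox", "attachmentProtectionEnabled", "sandboxEnabled", "malwareScanningEnabled",
   "attachmentScanEnabled"]

def scan_dict_for_attachment (value_dict : List (String × Bool)) : Bool :=
  let d := PySem.Dict.mk value_dict
  -- first loop: for field in explicit_fields: if value_dict.get(field) is True: return True
  if pvExplicitFields.any (fun field => d.get? field == some true) then true
  else
    -- second loop: for key in value_dict: three substring tests on key.lower()
    d.keys.any (fun key =>
      let lower_key := PySem.Str.lower key
      (PySem.Str.isIn "attachment" lower_key && (d.get? key == some true)) ||
      (PySem.Str.isIn "sandbox" lower_key && (d.get? key == some true)) ||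
      (PySem.Str.isIn "malware" lower_key && (d.get? key == some true)))

-- ===== PORT B =====
def scan_dict_for_attachment_alt (value_dict : List (String × Bool)) : Bool :=
  value_dict.any (fun p =>
    p.2 && ["attachment", "sandbox", "malware"].any (fun w => PySem.Str.isIn w (PySem.Str.lower p.1)))

-- ===== PRECONDITION & SPEC =====
-- Pre_ excludes association lists with duplicate keys: those do not represent any Python dict
-- (both Pythons receive a dict, whose keys are unique), so nothing is claimed there.
def Pre_scan_dict_for_attachment (value_dict : List (String × Bool)) : Prop :=
  (value_dict.map Prod.fst).Nodup
instance (value_dict : List (String × Bool)) : Decidable (Pre_scan_dict_for_attachment value_dict) := by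
  unfold Pre_scan_dict_for_attachment; infer_instance

def pvWitness_scan_dict_for_attachment : (List (String × Bool)) :=
  [("enableSandbox", true), ("foo", false)]

def Spec_scan_dict_for_attachment (value_dict : List (String × Bool)) (out : Bool) : Prop := out = scan_dict_for_attachment_alt value_dict
instance (value_dict : List (String × Bool)) (out : Bool) : Decidable (Spec_scan_dict_for_attachment value_dict out) := by unfold Spec_scan_dict_for_attachment; infer_instance

-- ===== CLAIM (what is proved, stated in full; the proofs are below) =====
def Claim_equal_scan_dict_for_attachment : Prop := ∀ (value_dict : List (String × Bool)), Dom_scan_dict_for_attachment value_dict → Pre_scan_dict_for_attachment value_dict → Spec_scan_dict_for_attachment value_dict (scan_dict_for_attachment value_dict)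

-- ===== LEMMAS AND PROOFS =====

-- B's per-pair test as a proposition
def pvHit (p : String × Bool) : Prop :=
  p.2 = true ∧ ∃ w ∈ (["attachment", "sandbox", "malware"] : List String),
    PySem.Str.isIn w (PySem.Str.lower p.1) = true

theorem pvAlt_eq_true_iff (vd : List (String × Bool)) :
    scan_dict_for_attachment_alt vd = true ↔ ∃ p ∈ vd, pvHit p := by
  simp [scan_dict_for_attachment_alt, List.any_eq_true, pvHit]

-- every explicit field name, lowercased, contains one of the keywords
theorem pvSub1 : pvHit ("attachmentScanningEnabled", true) := by
  refine ⟨rfl, "attachment", by simp, ?_⟩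
  rw [PySem.Str.isIn_iff_infix, PySem.Str.toList_lower,
      show ("attachmentScanningEnabled" : String).toList = ['a', 't', 't', 'a', 'c', 'h', 'm', 'e', 'n', 't', 'S', 'c', 'a', 'n', 'n', 'i', 'n', 'g', 'E', 'n', 'a', 'b', 'l', 'e', 'd'] from by decide,
      show PySem.Chars.lower ['a', 't', 't', 'a', 'c', 'h', 'm', 'e', 'n', 't', 'S', 'c', 'a', 'n', 'n', 'i', 'n', 'g', 'E', 'n', 'a', 'b', 'l', 'e', 'd'] = ['a', 't', 't', 'a', 'c', 'h', 'm', 'e', 'n', 't', 's', 'c', 'a', 'n', 'n', 'i', 'n', 'g', 'e', 'n', 'a', 'b', 'l', 'e', 'd'] from by decide,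
      show ("attachment" : String).toList = ['a', 't', 't', 'a', 'c', 'h', 'm', 'e', 'n', 't'] from by decide]
  decide

theorem pvSub2 : pvHit ("maliciousAttachmentEnabled", true) := by
  refine ⟨rfl, "attachment", by simp, ?_⟩
  rw [PySem.Str.isIn_iff_infix, PySem.Str.toList_lower,
      show ("maliciousAttachmentEnabled" : String).toList = ['m', 'a', 'l', 'i', 'c', 'i', 'o', 'u', 's', 'A', 't', 't', 'a', 'c', 'h', 'm', 'e', 'n', 't', 'E', 'n', 'a', 'b', 'l', 'e', 'd'] from by decide,
      show PySem.Chars.lower ['m', 'a', 'l', 'i', 'c', 'i', 'o', 'u', 's', 'A', 't', 't', 'a', 'c', 'h', 'm', 'e', 'n', 't', 'E', 'n', 'a', 'b', 'l', 'e', 'd'] = ['m', 'a', 'l', 'i', 'c', 'i', 'o', 'u', 's', 'a', 't', 't', 'a', 'c', 'h', 'm', 'e', 'n', 't', 'e', 'n', 'a', 'b', 'l', 'e', 'd'] from by decide,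
      show ("attachment" : String).toList = ['a', 't', 't', 'a', 'c', 'h', 'm', 'e', 'n', 't'] from by decide]
  decide

theorem pvSub3 : pvHit ("anomalousAttachmentProtectionEnabled", true) := by
  refine ⟨rfl, "attachment", by simp, ?_⟩
  rw [PySem.Str.isIn_iff_infix, PySem.Str.toList_lower,
      show ("anomalousAttachmentProtectionEnabled" : String).toList = ['a', 'n', 'o', 'm', 'a', 'l', 'o', 'u', 's', 'A', 't', 't', 'a', 'c', 'h', 'm', 'e', 'n', 't', 'P', 'r', 'o', 't', 'e', 'c', 't', 'i', 'o', 'n', 'E', 'n', 'a', 'b', 'l', 'e', 'd'] from by decide,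
      show PySem.Chars.lower ['a', 'n', 'o', 'm', 'a', 'l', 'o', 'u', 's', 'A', 't', 't', 'a', 'c', 'h', 'm', 'e', 'n', 't', 'P', 'r', 'o', 't', 'e', 'c', 't', 'i', 'o', 'n', 'E', 'n', 'a', 'b', 'l', 'e', 'd'] = ['a', 'n', 'o', 'm', 'a', 'l', 'o', 'u', 's', 'a', 't', 't', 'a', 'c', 'h', 'm', 'e', 'n', 't', 'p', 'r', 'o', 't', 'e', 'c', 't', 'i', 'o', 'n', 'e', 'n', 'a', 'b', 'l', 'e', 'd'] from by decide,
      show ("attachment" : String).toList = ['a', 't', 't', 'a', 'c', 'h', 'm', 'e', 'n', 't'] from by decide]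
  decide

theorem pvSub4 : pvHit ("enableSandbox", true) := by
  refine ⟨rfl, "sandbox", by simp, ?_⟩
  rw [PySem.Str.isIn_iff_infix, PySem.Str.toList_lower,
      show ("enableSandbox" : String).toList = ['e', 'n', 'a', 'b', 'l', 'e', 'S', 'a', 'n', 'd', 'b', 'o', 'x'] from by decide,
      show PySem.Chars.lower ['e', 'n', 'a', 'b', 'l', 'e', 'S', 'a', 'n', 'd', 'b', 'o', 'x'] = ['e', 'n', 'a', 'b', 'l', 'e', 's', 'a', 'n', 'd', 'b', 'o', 'x'] from by decide,
      show ("sandbox" : String).toList = ['s', 'a', 'n', 'd', 'b', 'o', 'x'] from by decide]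
  decide

theorem pvSub5 : pvHit ("attachmentProtectionEnabled", true) := by
  refine ⟨rfl, "attachment", by simp, ?_⟩
  rw [PySem.Str.isIn_iff_infix, PySem.Str.toList_lower,
      show ("attachmentProtectionEnabled" : String).toList = ['a', 't', 't', 'a', 'c', 'h', 'm', 'e', 'n', 't', 'P', 'r', 'o', 't', 'e', 'c', 't', 'i', 'o', 'n', 'E', 'n', 'a', 'b', 'l', 'e', 'd'] from by decide,
      show PySem.Chars.lower ['a', 't', 't', 'a', 'c', 'h', 'm', 'e', 'n', 't', 'P', 'r', 'o', 't', 'e', 'c', 't', 'i', 'o', 'n', 'E', 'n', 'a', 'b', 'l', 'e', 'd'] = ['a', 't', 't', 'a', 'c', 'h', 'm', 'e', 'n', 't', 'p', 'r', 'o', 't', 'e', 'c', 't', 'i', 'o', 'n', 'e', 'n', 'a', 'b', 'l', 'e', 'd'] from by decide,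
      show ("attachment" : String).toList = ['a', 't', 't', 'a', 'c', 'h', 'm', 'e', 'n', 't'] from by decide]
  decide

theorem pvSub6 : pvHit ("sandboxEnabled", true) := by
  refine ⟨rfl, "sandbox", by simp, ?_⟩
  rw [PySem.Str.isIn_iff_infix, PySem.Str.toList_lower,
      show ("sandboxEnabled" : String).toList = ['s', 'a', 'n', 'd', 'b', 'o', 'x', 'E', 'n', 'a', 'b', 'l', 'e', 'd'] from by decide,
      show PySem.Chars.lower ['s', 'a', 'n', 'd', 'b', 'o', 'x', 'E', 'n', 'a', 'b', 'l', 'e', 'd'] = ['s', 'a', 'n', 'd', 'b', 'o', 'x', 'e', 'n', 'a', 'b', 'l', 'e', 'd'] from by decide,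
      show ("sandbox" : String).toList = ['s', 'a', 'n', 'd', 'b', 'o', 'x'] from by decide]
  decide

theorem pvSub7 : pvHit ("malwareScanningEnabled", true) := by
  refine ⟨rfl, "malware", by simp, ?_⟩
  rw [PySem.Str.isIn_iff_infix, PySem.Str.toList_lower,
      show ("malwareScanningEnabled" : String).toList = ['m', 'a', 'l', 'w', 'a', 'r', 'e', 'S', 'c', 'a', 'n', 'n', 'i', 'n', 'g', 'E', 'n', 'a', 'b', 'l', 'e', 'd'] from by decide,
      show PySem.Chars.lower ['m', 'a', 'l', 'w', 'a', 'r', 'e', 'S', 'c', 'a', 'n', 'n', 'i', 'n', 'g', 'E', 'n', 'a', 'b', 'l', 'e', 'd'] = ['m', 'a', 'l', 'w', 'a', 'r', 'e', 's', 'c', 'a', 'n', 'n', 'i', 'n', 'g', 'e', 'n', 'a', 'b', 'l', 'e', 'd'] from by decide,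
      show ("malware" : String).toList = ['m', 'a', 'l', 'w', 'a', 'r', 'e'] from by decide]
  decide

theorem pvSub8 : pvHit ("attachmentScanEnabled", true) := by
  refine ⟨rfl, "attachment", by simp, ?_⟩
  rw [PySem.Str.isIn_iff_infix, PySem.Str.toList_lower,
      show ("attachmentScanEnabled" : String).toList = ['a', 't', 't', 'a', 'c', 'h', 'm', 'e', 'n', 't', 'S', 'c', 'a', 'n', 'E', 'n', 'a', 'b', 'l', 'e', 'd'] from by decide,
      show PySem.Chars.lower ['a', 't', 't', 'a', 'c', 'h', 'm', 'e', 'n', 't', 'S', 'c', 'a', 'n', 'E', 'n', 'a', 'b', 'l', 'e', 'd'] = ['a', 't', 't', 'a', 'c', 'h', 'm', 'e', 'n', 't', 's', 'c', 'a', 'n', 'e', 'n', 'a', 'b', 'l', 'e', 'd'] from by decide,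
      show ("attachment" : String).toList = ['a', 't', 't', 'a', 'c', 'h', 'm', 'e', 'n', 't'] from by decide]
  decide

theorem pvExplicit_hit (f : String) (hf : f ∈ pvExplicitFields) :
    pvHit (f, true) := by
  fin_cases hf
  exacts [pvSub1, pvSub2, pvSub3, pvSub4, pvSub5, pvSub6, pvSub7, pvSub8]

-- with unique keys, a successful lookup means the pair is in the list
theorem pvGet_mem (vd : List (String × Bool)) (_ : (vd.map Prod.fst).Nodup)
    (k : String) (v : Bool) (hk : (PySem.Dict.mk vd).get? k = some v) : (k, v) ∈ vd := by
  have := PySem.Dict.mem_items_of_get?_eq_some (PySem.Dict.mk vd) hk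
  simpa [PySem.Dict.items] using this

theorem pvMem_get (vd : List (String × Bool)) (h : (vd.map Prod.fst).Nodup)
    (k : String) (v : Bool) (hm : (k, v) ∈ vd) : (PySem.Dict.mk vd).get? k = some v := by
  exact PySem.Dict.get?_of_mem_items (PySem.Dict.mk vd) (by simpa [PySem.Dict.items] using hm)
    (by simpa [PySem.Dict.keys, PySem.Dict.items] using h)

theorem pvMain (vd : List (String × Bool)) (h : (vd.map Prod.fst).Nodup) :
    scan_dict_for_attachment vd = scan_dict_for_attachment_alt vd := by
  rw [Bool.eq_iff_iff, pvAlt_eq_true_iff]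
  constructor
  · intro hA
    unfold scan_dict_for_attachment at hA
    by_cases hex : pvExplicitFields.any (fun field => (PySem.Dict.mk vd).get? field == some true) = true
    · rcases List.any_eq_true.mp hex with ⟨f, hf, hget⟩
      exact ⟨(f, true), pvGet_mem vd h f true (by simpa using hget), pvExplicit_hit f hf⟩
    · simp only [hex] at hA
      rcases List.any_eq_true.mp hA with ⟨k, hk, hcond⟩
      simp only [Bool.or_eq_true, Bool.and_eq_true, beq_iff_eq] at hcond
      have hget : (PySem.Dict.mk vd).get? k = some true := by
        rcases hcond with (⟨_, h2⟩ | ⟨_, h2⟩) | ⟨_, h2⟩ <;> exact h2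
      refine ⟨(k, true), pvGet_mem vd h k true hget, rfl, ?_⟩
      rcases hcond with (⟨h1, _⟩ | ⟨h1, _⟩) | ⟨h1, _⟩
      · exact ⟨"attachment", by simp, h1⟩
      · exact ⟨"sandbox", by simp, h1⟩
      · exact ⟨"malware", by simp, h1⟩
  · rintro ⟨⟨k, v⟩, hmem, hv, w, hw, hsub⟩
    have hget : (PySem.Dict.mk vd).get? k = some true := pvMem_get vd h k true (hv ▸ hmem)
    unfold scan_dict_for_attachment
    by_cases hex : pvExplicitFields.any (fun field => (PySem.Dict.mk vd).get? field == some true) = true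
    · simp [hex]
    · simp only [hex]
      refine List.any_eq_true.mpr ⟨k, ?_, ?_⟩
      · simp only [PySem.Dict.keys]
        exact List.mem_map.mpr ⟨(k, v), hmem, rfl⟩
      · simp only [Bool.or_eq_true, Bool.and_eq_true, beq_iff_eq]
        simp only [List.mem_cons, List.not_mem_nil, or_false] at hw
        rcases hw with rfl | rfl | rfl
        · exact Or.inl (Or.inl ⟨hsub, hget⟩)
        · exact Or.inl (Or.inr ⟨hsub, hget⟩)
        · exact Or.inr ⟨hsub, hget⟩

-- ===== VERDICT (by name: the statement is the Claim_ definition above) =====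
theorem scan_dict_for_attachment_spec : Claim_equal_scan_dict_for_attachment := by
  intro vd _ hpre
  unfold Spec_scan_dict_for_attachment
  exact pvMain vd hpre
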